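-- pv_equiv track=rewrite | github.com/HengLine/video-shot-agent | hengline/agent/continuity_guardian/validator/motion_validator.py | _is_oscillating_motion
-- ===== SOURCE A (Python) =====
-- from typing import List, Tuple, Dict, Any
--
-- def _is_oscillating_motion(trajectory: List[Tuple]) -> bool:
--     """检测是否振荡运动"""
--     if len(trajectory) < 6:
--         return False
--
--     # 检查位置变化方向
--     direction_changes = 0
--     for i in range(2, len(trajectory)):
--         dx1 = trajectory[i - 1][0] - trajectory[i - 2][0]
--         dx2 = trajectory[i][0] - trajectory[i - 1][0]
--
--         if dx1 * dx2 < 0:  # 方向改变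
--             direction_changes += 1
--
--     # 如果有足够多的方向改变，可能是振荡运动
--     return direction_changes >= len(trajectory) // 3
-- ===== SOURCE B (Python) =====
-- from typing import List, Tuple
--
--
-- def _sign(x):
--     return (x > 0) - (x < 0)
--
--
-- def _is_oscillating_motion(trajectory: List[Tuple]) -> bool:
--     """检测是否振荡运动 — run-length encoding of the signs of the x-deltas.
--
--     A direction change is a boundary between a +1 run and a -1 run in the
--     run-length-compressed sign sequence (equal adjacent signs never have a
--     negative product, so compressing runs preserves the count).
--     """
--     n = len(trajectory)
--     if n < 6:
--         return False
--     runs = []  # consecutive-duplicate-free sequence of delta signs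
--     prev = None
--     for a, b in zip(trajectory, trajectory[1:]):
--         s = _sign(b[0] - a[0])
--         if s != prev:
--             runs.append(s)
--             prev = s
--     changes = sum(1 for r1, r2 in zip(runs, runs[1:]) if r1 * r2 < 0)
--     return changes >= n // 3
-- ===== Notes on version B (the rewrite author's own statement) =====
-- stated objective: alternative
-- what changed: Replaces A's direct loop that tests the product of two recomputed raw deltas at each index with a run-length-encoding algorithm: quantize each x-delta to its sign, compress consecutive equal signs into runs, and count run boundaries whose signs have a negative product.
-- outside the precondition, e.g. on _is_oscillating_motion([(), (1,), (2,), (3,), (4,), (5,)]): A raises IndexError, B raises IndexError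
import Mathlib
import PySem

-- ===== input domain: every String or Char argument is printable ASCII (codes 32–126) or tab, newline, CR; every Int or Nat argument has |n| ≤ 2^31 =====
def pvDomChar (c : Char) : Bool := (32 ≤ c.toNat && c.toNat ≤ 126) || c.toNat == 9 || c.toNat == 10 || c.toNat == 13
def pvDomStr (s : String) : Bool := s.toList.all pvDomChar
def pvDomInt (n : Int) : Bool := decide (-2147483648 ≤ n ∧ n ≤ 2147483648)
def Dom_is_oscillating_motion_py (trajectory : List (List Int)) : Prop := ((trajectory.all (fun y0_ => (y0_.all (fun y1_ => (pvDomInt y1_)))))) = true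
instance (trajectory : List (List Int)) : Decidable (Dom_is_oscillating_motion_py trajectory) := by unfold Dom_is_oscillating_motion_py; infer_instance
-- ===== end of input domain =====

-- B replaces A's direct product test on raw deltas with run-length encoding of
-- the delta signs and counts boundaries between opposite-sign runs; objective: alternative.

-- ===== PORT A =====
-- literal port of A: indexed loop for i in range(2, len(trajectory)) with dx1/dx2 recomputed from indices
def is_oscillating_motion_py (trajectory : List (List Int)) : Bool :=
  if trajectory.length < 6 then false
  else
    let dc : Int :=
      (PySem.List.pyRange 2 (trajectory.length : Int)).foldl
        (fun acc i =>
          let dx1 := PySem.List.pyGetD (PySem.List.pyGetD trajectory (i - 1) []) 0 0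
                   - PySem.List.pyGetD (PySem.List.pyGetD trajectory (i - 2) []) 0 0
          let dx2 := PySem.List.pyGetD (PySem.List.pyGetD trajectory i []) 0 0
                   - PySem.List.pyGetD (PySem.List.pyGetD trajectory (i - 1) []) 0 0
          if dx1 * dx2 < 0 then acc + 1 else acc) 0
    decide (dc ≥ PySem.Int.floordiv (trajectory.length : Int) 3)

-- ===== PORT B =====
-- _sign(x) = (x > 0) - (x < 0)
def pvSign (x : Int) : Int := (if x > 0 then 1 else 0) - (if x < 0 then 1 else 0)

-- literal port of B: run-length-compress the delta signs (prev : Option Int mirrors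
-- Python's prev = None), then count adjacent run pairs with a negative product
def is_oscillating_motion_py_alt (trajectory : List (List Int)) : Bool :=
  if trajectory.length < 6 then false
  else
    let st : List Int × Option Int :=
      (trajectory.zip trajectory.tail).foldl
        (fun st ab =>
          let s := pvSign (PySem.List.pyGetD ab.2 0 0 - PySem.List.pyGetD ab.1 0 0)
          if some s ≠ st.2 then (st.1 ++ [s], some s) else st)
        ([], none)
    let runs := st.1
    let changes : Int :=
      ((runs.zip runs.tail).map
        (fun p => if p.1 * p.2 < 0 then (1 : Int) else 0)).sum
    decide (changes ≥ PySem.Int.floordiv (trajectory.length : Int) 3)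

-- ===== PRECONDITION & SPEC =====
-- Pre_ excludes only inputs where Python A raises IndexError: length ≥ 6 with some empty inner point.
def Pre_is_oscillating_motion_py (trajectory : List (List Int)) : Prop :=
  trajectory.length < 6 ∨ ∀ p ∈ trajectory, p ≠ []
instance (trajectory : List (List Int)) : Decidable (Pre_is_oscillating_motion_py trajectory) := by
  unfold Pre_is_oscillating_motion_py; infer_instance
def pvWitness_is_oscillating_motion_py : List (List Int) :=
  [[0], [1], [0], [1], [0], [1]]
def Spec_is_oscillating_motion_py (trajectory : List (List Int)) (out : Bool) : Prop := out = is_oscillating_motion_py_alt trajectory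
instance (trajectory : List (List Int)) (out : Bool) : Decidable (Spec_is_oscillating_motion_py trajectory out) := by unfold Spec_is_oscillating_motion_py; infer_instance

-- ===== CLAIM (what is proved, stated in full; the proofs are below) =====
def Claim_equal_is_oscillating_motion_py : Prop := ∀ (trajectory : List (List Int)), Dom_is_oscillating_motion_py trajectory → Pre_is_oscillating_motion_py trajectory → Spec_is_oscillating_motion_py trajectory (is_oscillating_motion_py trajectory)

-- ===== LEMMAS AND PROOFS =====

-- count of adjacent pairs with negative product
def pvCAN (L : List Int) : Int :=
  ((L.zip L.tail).map (fun p => if p.1 * p.2 < 0 then (1 : Int) else 0)).sum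

-- pure run-length compression, parameterised by the previous sign
def pvCompress (prev : Option Int) : List Int → List Int
  | [] => []
  | s :: rest => if some s ≠ prev then s :: pvCompress (some s) rest else pvCompress prev rest

theorem pvCAN_cons_cons (a b : Int) (L : List Int) :
    pvCAN (a :: b :: L) = (if a * b < 0 then (1 : Int) else 0) + pvCAN (b :: L) := by
  simp [pvCAN]

theorem pvSign_of_neg (a : Int) (ha : a < 0) : pvSign a = -1 := by
  simp [pvSign, ha, asymm ha]

theorem pvSign_of_pos (a : Int) (ha : 0 < a) : pvSign a = 1 := by
  simp [pvSign, ha, asymm ha]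

theorem pvSign_mul_neg (a b : Int) : (pvSign a * pvSign b < 0) ↔ (a * b < 0) := by
  rcases lt_trichotomy a 0 with ha | ha | ha <;> rcases lt_trichotomy b 0 with hb | hb | hb
  · rw [pvSign_of_neg a ha, pvSign_of_neg b hb]
    norm_num
    exact (mul_pos_of_neg_of_neg ha hb).le
  · subst hb; simp [pvSign]
  · rw [pvSign_of_neg a ha, pvSign_of_pos b hb]
    norm_num
    exact mul_neg_of_neg_of_pos ha hb
  · subst ha; simp [pvSign]
  · subst ha; simp [pvSign]
  · subst ha; simp [pvSign]
  · rw [pvSign_of_pos a ha, pvSign_of_neg b hb]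
    norm_num
    exact mul_neg_of_pos_of_neg ha hb
  · subst hb; simp [pvSign]
  · rw [pvSign_of_pos a ha, pvSign_of_pos b hb]
    norm_num
    exact (mul_pos ha hb).le

-- quantizing to signs preserves the adjacent-negative-product count
theorem pvCAN_map_sign (L : List Int) : pvCAN (L.map pvSign) = pvCAN L := by
  induction L with
  | nil => rfl
  | cons a L ih =>
    cases L with
    | nil => rfl
    | cons b L =>
      simp only [List.map_cons] at ih ⊢
      rw [pvCAN_cons_cons, pvCAN_cons_cons, ih]
      congr 1
      by_cases h : a * b < 0
      · rw [if_pos h, if_pos ((pvSign_mul_neg a b).mpr h)]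
      · rw [if_neg h, if_neg (fun hc => h ((pvSign_mul_neg a b).mp hc))]

-- compression after a fixed head preserves the count
theorem pvCAN_compress_cons (p : Int) (L : List Int) :
    pvCAN (p :: pvCompress (some p) L) = pvCAN (p :: L) := by
  induction L generalizing p with
  | nil => rfl
  | cons s rest ih =>
    by_cases h : s = p
    · subst h
      rw [show pvCompress (some s) (s :: rest) = pvCompress (some s) rest by
        simp [pvCompress]]
      rw [ih s, pvCAN_cons_cons]
      have : ¬ (s * s < 0) := not_lt.mpr (mul_self_nonneg s)
      rw [if_neg this]; ring
    · rw [show pvCompress (some p) (s :: rest) = s :: pvCompress (some s) rest by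
          simp [pvCompress, h]]
      rw [pvCAN_cons_cons, ih s, pvCAN_cons_cons]

theorem pvCAN_compress_none (L : List Int) : pvCAN (pvCompress none L) = pvCAN L := by
  cases L with
  | nil => rfl
  | cons s rest =>
    rw [show pvCompress none (s :: rest) = s :: pvCompress (some s) rest by simp [pvCompress]]
    exact pvCAN_compress_cons s rest

-- B's fold computes acc ++ pvCompress prev L (first component)
theorem pvFold_compress (L : List Int) (acc : List Int) (prev : Option Int) :
    (L.foldl
      (fun (st : List Int × Option Int) s =>
        if some s ≠ st.2 then (st.1 ++ [s], some s) else st)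
      (acc, prev)).1 = acc ++ pvCompress prev L := by
  induction L generalizing acc prev with
  | nil => simp [pvCompress]
  | cons s rest ih =>
    simp only [List.foldl_cons]
    by_cases h : some s = prev
    · rw [show (if some s ≠ (acc, prev).2 then ((acc, prev).1 ++ [s], some s)
            else (acc, prev)) = (acc, prev) by simp [h]]
      rw [ih, show pvCompress prev (s :: rest) = pvCompress prev rest by
        simp [pvCompress, h]]
    · rw [show (if some s ≠ (acc, prev).2 then ((acc, prev).1 ++ [s], some s)
            else (acc, prev)) = (acc ++ [s], some s) by simp [h]]
      rw [ih, show pvCompress prev (s :: rest) = s :: pvCompress (some s) rest by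
        simp [pvCompress, h]]
      simp

-- range(2, m) as a shifted List.range
theorem pvRange_two_eq (m : Nat) :
    PySem.List.pyRange 2 (m : Int) = List.map (fun j : Nat => ((j : Int) + 2)) (List.range (m - 2)) := by
  induction m with
  | zero => decide
  | succ k ih =>
    by_cases hk : 2 ≤ k
    · have h2 : (2 : Int) ≤ (k : Int) := by exact_mod_cast hk
      have hc : ((k + 1 : Nat) : Int) = (k : Int) + 1 := by push_cast; ring
      rw [hc, PySem.List.pyRange_one_succ_right h2, ih]
      have hr : k + 1 - 2 = (k - 2) + 1 := by omega
      rw [hr, List.range_succ, List.map_append]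
      simp only [List.map_cons, List.map_nil]
      congr 2
      push_cast [Nat.cast_sub hk]
      ring
    · interval_cases k <;> decide

-- adjacent pairs of D as an indexed map over List.range
theorem pvAdjZip_eq (D : List Int) :
    D.zip D.tail = (List.range (D.length - 1)).map (fun j => (D.getD j 0, D.getD (j + 1) 0)) := by
  induction D with
  | nil => simp
  | cons a D' ih =>
    cases D' with
    | nil => simp
    | cons b D'' =>
      have hlen : (a :: b :: D'').length - 1 = ((b :: D'').length - 1) + 1 := by simp
      rw [hlen, List.range_succ_eq_map, List.map_cons, List.map_map]
      show (a, b) :: ((b :: D'').zip D'') = (a, b) :: _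
      rw [List.tail_cons] at ih
      rw [ih]
      congr 1

-- A's fold equals pvCAN of the delta list
theorem pvA_eq_pvCAN (t : List (List Int)) (h : ¬ t.length < 6) :
    (PySem.List.pyRange 2 (t.length : Int)).foldl
        (fun acc i =>
          let dx1 := PySem.List.pyGetD (PySem.List.pyGetD t (i - 1) []) 0 0
                   - PySem.List.pyGetD (PySem.List.pyGetD t (i - 2) []) 0 0
          let dx2 := PySem.List.pyGetD (PySem.List.pyGetD t i []) 0 0
                   - PySem.List.pyGetD (PySem.List.pyGetD t (i - 1) []) 0 0
          if dx1 * dx2 < 0 then acc + 1 else acc) 0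
    = pvCAN ((t.zip t.tail).map
        (fun ab => PySem.List.pyGetD ab.2 0 0 - PySem.List.pyGetD ab.1 0 0)) := by
  rw [show (fun (acc : Int) i =>
        let dx1 := PySem.List.pyGetD (PySem.List.pyGetD t (i - 1) []) 0 0
                 - PySem.List.pyGetD (PySem.List.pyGetD t (i - 2) []) 0 0
        let dx2 := PySem.List.pyGetD (PySem.List.pyGetD t i []) 0 0
                 - PySem.List.pyGetD (PySem.List.pyGetD t (i - 1) []) 0 0
        if dx1 * dx2 < 0 then acc + 1 else acc)
      = (fun (acc : Int) i =>
          if (fun i => decide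
             ((PySem.List.pyGetD (PySem.List.pyGetD t (i - 1) []) 0 0
                 - PySem.List.pyGetD (PySem.List.pyGetD t (i - 2) []) 0 0)
              * (PySem.List.pyGetD (PySem.List.pyGetD t i []) 0 0
                 - PySem.List.pyGetD (PySem.List.pyGetD t (i - 1) []) 0 0) < 0)) i = true
          then acc + 1 else acc) from by
        funext acc i; simp]
  rw [PySem.List.foldl_count_if]
  unfold pvCAN
  rw [show (fun p : Int × Int => if p.1 * p.2 < 0 then (1 : Int) else 0)
      = (fun p : Int × Int => if decide (p.1 * p.2 < 0) = true then (1 : Int) else 0) from by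
    funext p; simp]
  rw [PySem.List.sum_map_ite_one_zero]
  rw [pvRange_two_eq t.length, pvAdjZip_eq]
  rw [List.countP_map, List.countP_map]
  have hdl : ((t.zip t.tail).map
      (fun ab => PySem.List.pyGetD ab.2 0 0 - PySem.List.pyGetD ab.1 0 0)).length
      = t.length - 1 := by
    simp [List.length_zip, List.length_tail]
  rw [hdl]
  have hrr : t.length - 1 - 1 = t.length - 2 := by omega
  rw [hrr]
  simp only [zero_add]
  congr 1
  apply List.countP_congr
  intro j hj
  have hj2 : j < t.length - 2 := List.mem_range.mp hj
  have hget : ∀ k, k < t.length - 1 →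
      ((t.zip t.tail).map
        (fun ab => PySem.List.pyGetD ab.2 0 0 - PySem.List.pyGetD ab.1 0 0)).getD k 0
      = PySem.List.pyGetD (t.getD (k + 1) []) 0 0 - PySem.List.pyGetD (t.getD k []) 0 0 := by
    intro k hk
    have hkl : k < ((t.zip t.tail).map
        (fun ab => PySem.List.pyGetD ab.2 0 0 - PySem.List.pyGetD ab.1 0 0)).length := by
      rw [hdl]; exact hk
    rw [List.getD_eq_getElem _ _ hkl]
    have hkz : k < (t.zip t.tail).length := by simpa using hkl
    rw [List.getElem_map, List.getElem_zip]
    have hkt : k < t.tail.length := by simp [List.length_tail]; omega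
    rw [List.getElem_tail]
    rw [List.getD_eq_getElem t [] (by omega : k + 1 < t.length),
        List.getD_eq_getElem t [] (by omega : k < t.length)]
  rw [Function.comp_apply, Function.comp_apply]
  rw [hget j (by omega), hget (j + 1) (by omega)]
  have e0 : ((j : Int) + 2) - 2 = ((j : Nat) : Int) := by ring
  have e1 : ((j : Int) + 2) - 1 = (((j + 1 : Nat)) : Int) := by push_cast; ring
  have e2 : ((j : Int) + 2) = (((j + 2 : Nat)) : Int) := by push_cast; ring
  rw [e0, e1, e2]
  rw [PySem.List.pyGetD_natCast, PySem.List.pyGetD_natCast, PySem.List.pyGetD_natCast]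

-- ===== VERDICT (by name: the statement is the Claim_ definition above) =====
theorem is_oscillating_motion_py_spec : Claim_equal_is_oscillating_motion_py := by
  intro t _ _
  unfold Spec_is_oscillating_motion_py is_oscillating_motion_py is_oscillating_motion_py_alt
  by_cases h : t.length < 6
  · simp [h]
  · simp only [h, if_false]
    rw [pvA_eq_pvCAN t h]
    -- B side: fold = compression of the sign list; its pvCAN equals that of the deltas
    have hfold :
        ((t.zip t.tail).foldl
          (fun (st : List Int × Option Int) ab =>
            let s := pvSign (PySem.List.pyGetD ab.2 0 0 - PySem.List.pyGetD ab.1 0 0)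
            if some s ≠ st.2 then (st.1 ++ [s], some s) else st)
          ([], none)).1
        = pvCompress none (((t.zip t.tail).map
            (fun ab => PySem.List.pyGetD ab.2 0 0 - PySem.List.pyGetD ab.1 0 0)).map pvSign) := by
      rw [List.map_map]
      have h1 :
          ((t.zip t.tail).foldl
            (fun (st : List Int × Option Int) ab =>
              let s := pvSign (PySem.List.pyGetD ab.2 0 0 - PySem.List.pyGetD ab.1 0 0)
              if some s ≠ st.2 then (st.1 ++ [s], some s) else st)
            ([], none))
          = (((t.zip t.tail).map
              (fun ab => pvSign (PySem.List.pyGetD ab.2 0 0 - PySem.List.pyGetD ab.1 0 0))).foldl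
            (fun (st : List Int × Option Int) s =>
              if some s ≠ st.2 then (st.1 ++ [s], some s) else st)
            ([], none)) := by
        rw [List.foldl_map]
      rw [h1, pvFold_compress, List.nil_append]
      rfl

    show _ = decide (pvCAN _ ≥ _)
    rw [hfold, pvCAN_compress_none, pvCAN_map_sign]
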